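-- pv_equiv track=rewrite | github.com/stasl0217/KEnS | src/ensemble.py | voting
-- ===== SOURCE A (Python) =====
-- from collections import defaultdict
--
-- def voting(choice_lists, k):
--     """
--     :param choice_lists: list[list[(item, score_by_model)]]. choices from each model
--     :param k: return top k list[(item,score)]
--     :return:
--     """
--     item_scores = defaultdict(lambda: 0)  # {entity_id: score} default score is 0
--     for choice_list in choice_lists:  # choice_list [[id1], [id2], ...]
--         for entity, score in choice_list:  # entity [single_id]
--             item_scores[entity] += 1
--     sorted_item_scores = sorted(item_scores.items(), key=lambda x: x[1], reverse=True)  # descending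
--     topk = sorted_item_scores[:k]  # list[(item,score)], length k
--     # items = [pair[0] for pair in topk]
--     return topk
-- ===== SOURCE B (Python) =====
-- def voting(choice_lists, k):
--     counts = {}
--     for choice_list in choice_lists:
--         for entity, score in choice_list:
--             counts[entity] = counts.get(entity, 0) + 1
--     total = sum(len(cl) for cl in choice_lists)
--     buckets = [[] for _ in range(total + 1)]
--     for entity, c in counts.items():
--         buckets[c].append((entity, c))
--     result = []
--     for c in range(total, 0, -1):
--         result.extend(buckets[c])
--     return result[:k]
-- ===== Notes on version B (the rewrite author's own statement) =====
-- stated objective: alternative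
-- what changed: Replaces the stable descending sort of the count dict by a counting/bucket sort: entities are appended (in dict insertion order) to buckets indexed by their vote count, and buckets are concatenated from the highest count down before slicing the top k.
import Mathlib
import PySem

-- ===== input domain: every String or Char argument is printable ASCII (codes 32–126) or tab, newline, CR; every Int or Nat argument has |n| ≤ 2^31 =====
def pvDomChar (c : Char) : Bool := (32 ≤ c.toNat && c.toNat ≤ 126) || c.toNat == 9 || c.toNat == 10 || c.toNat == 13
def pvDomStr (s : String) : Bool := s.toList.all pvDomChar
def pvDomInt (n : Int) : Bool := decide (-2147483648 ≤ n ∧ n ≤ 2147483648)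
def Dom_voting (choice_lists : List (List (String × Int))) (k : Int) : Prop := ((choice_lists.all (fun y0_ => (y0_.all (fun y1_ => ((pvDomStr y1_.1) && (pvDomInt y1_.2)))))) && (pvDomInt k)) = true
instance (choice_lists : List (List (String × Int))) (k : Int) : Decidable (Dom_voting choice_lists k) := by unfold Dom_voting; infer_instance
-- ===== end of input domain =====

-- B replaces A's stable descending sort of the vote counts by a counting/bucket sort over counts 1..total (alternative algorithm; return values proved equal).


-- ===== PORT A =====
def voting (choice_lists : List (List (String × Int))) (k : Int) : List (String × Int) :=
  let item_scores : PySem.Dict String Int :=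
    choice_lists.foldl (fun d choice_list =>
      choice_list.foldl (fun d p => d.modify p.1 0 (· + 1)) d) PySem.Dict.empty
  let sorted_item_scores := PySem.List.sorted item_scores.items (fun x => x.2) true
  PySem.List.slice sorted_item_scores none (some k)

-- ===== PORT B =====
def voting_alt (choice_lists : List (List (String × Int))) (k : Int) : List (String × Int) :=
  let counts : PySem.Dict String Int :=
    choice_lists.foldl (fun d choice_list =>
      choice_list.foldl (fun d p => d.insert p.1 (d.getD p.1 0 + 1)) d) PySem.Dict.empty
  let total : Int := choice_lists.foldl (fun s cl => s + (cl.length : Int)) 0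
  let buckets : List (List (String × Int)) :=
    counts.items.foldl (fun bs p => bs.set p.2.toNat (bs.getD p.2.toNat [] ++ [p]))
      (List.replicate (total.toNat + 1) [])
  let result := (PySem.List.pyRange total 0 (-1)).foldl (fun r c => r ++ buckets.getD c.toNat []) []
  PySem.List.slice result none (some k)

-- ===== PRECONDITION & SPEC =====
def Spec_voting (choice_lists : List (List (String × Int))) (k : Int) (out : List (String × Int)) : Prop := out = voting_alt choice_lists k
instance (choice_lists : List (List (String × Int))) (k : Int) (out : List (String × Int)) : Decidable (Spec_voting choice_lists k out) := by unfold Spec_voting; infer_instance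

-- ===== CLAIM (what is proved, stated in full; the proofs are below) =====
def Claim_equal_voting : Prop := ∀ (choice_lists : List (List (String × Int))) (k : Int), Dom_voting choice_lists k → Spec_voting choice_lists k (voting choice_lists k)

-- ===== LEMMAS AND PROOFS =====

-- helpers used only by the proofs
def pvIns (acc : List (String × Int)) (x : String × Int) : List (String × Int) :=
  PySem.List.insertBy (fun a b => decide (b.2 < a.2)) x acc

def pvBucketed (cs : List Int) (xs : List (String × Int)) : List (String × Int) :=
  cs.flatMap (fun c => xs.filter (fun p => p.2 == c))

theorem pv_insertBy_append_not {α : Type} (before : α → α → Bool) (x : α) (l1 l2 : List α)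
    (h : ∀ y ∈ l1, before x y = false) :
    PySem.List.insertBy before x (l1 ++ l2) = l1 ++ PySem.List.insertBy before x l2 := by
  induction l1 with
  | nil => simp
  | cons y t ih =>
    have hy := h y (by simp)
    simp [PySem.List.insertBy, hy, ih (fun z hz => h z (by simp [hz]))]

theorem pv_insertBy_all_before {α : Type} (before : α → α → Bool) (x : α) (l : List α)
    (h : ∀ y ∈ l, before x y = true) :
    PySem.List.insertBy before x l = x :: l := by
  cases l with
  | nil => simp [PySem.List.insertBy]
  | cons y t => simp [PySem.List.insertBy, h y (by simp)]

theorem pv_mem_bucketed_snd (cs : List Int) (xs : List (String × Int)) (y : String × Int)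
    (h : y ∈ pvBucketed cs xs) : y.2 ∈ cs := by
  simp only [pvBucketed, List.mem_flatMap, List.mem_filter, beq_iff_eq] at h
  obtain ⟨c, hc, _, he⟩ := h
  exact he ▸ hc

theorem pv_insert_bucketed (cs : List Int) (hcs : cs.Pairwise (· > ·)) (xs : List (String × Int))
    (x : String × Int) (hx : x.2 ∈ cs) :
    pvIns (pvBucketed cs xs) x = pvBucketed cs (xs ++ [x]) := by
  induction cs with
  | nil => simp at hx
  | cons c cs' ih =>
    rw [List.pairwise_cons] at hcs
    obtain ⟨hgt, htail⟩ := hcs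
    by_cases hxc : x.2 = c
    · -- append x at the end of bucket c, in front of all lower buckets
      have h1 : ∀ y ∈ xs.filter (fun p => p.2 == c), (decide (y.2 < x.2)) = false := by
        intro y hy
        have := (List.mem_filter.mp hy).2
        simp only [beq_iff_eq] at this
        simp [this, hxc]
      have h2 : ∀ y ∈ pvBucketed cs' xs, (decide (y.2 < x.2)) = true := by
        intro y hy
        have hm := pv_mem_bucketed_snd cs' xs y hy
        have := hgt _ hm
        simp; omega
      have hlhs : pvIns (pvBucketed (c :: cs') xs) x
          = xs.filter (fun p => p.2 == c) ++ (x :: pvBucketed cs' xs) := by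
        simp only [pvIns, pvBucketed, List.flatMap_cons]
        rw [pv_insertBy_append_not _ _ _ _ h1, pv_insertBy_all_before _ _ _ h2]
      have hcs'x : ∀ c' ∈ cs', (xs ++ [x]).filter (fun p => p.2 == c') = xs.filter (fun p => p.2 == c') := by
        intro c' hc'
        have : x.2 ≠ c' := by have := hgt _ hc'; omega
        simp [List.filter_append, this]
      have hrhs : pvBucketed (c :: cs') (xs ++ [x])
          = (xs.filter (fun p => p.2 == c) ++ [x]) ++ pvBucketed cs' xs := by
        simp only [pvBucketed, List.flatMap_cons]
        rw [List.filter_append, List.flatMap_congr hcs'x]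
        simp [hxc]
      rw [hlhs, hrhs]; simp
    · have hx' : x.2 ∈ cs' := by
        rcases List.mem_cons.mp hx with h | h
        · exact absurd h hxc
        · exact h
      have h1 : ∀ y ∈ xs.filter (fun p => p.2 == c), (decide (y.2 < x.2)) = false := by
        intro y hy
        have hyc := (List.mem_filter.mp hy).2
        simp only [beq_iff_eq] at hyc
        have : x.2 < c := hgt _ hx'
        simp [hyc]; omega
      have hfx : (xs ++ [x]).filter (fun p => p.2 == c) = xs.filter (fun p => p.2 == c) := by
        simp [List.filter_append, hxc]
      simp only [pvIns, pvBucketed, List.flatMap_cons] at *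
      rw [pv_insertBy_append_not _ _ _ _ h1, hfx, ih htail hx']

theorem pv_foldl_bucketed (cs : List Int) (hcs : cs.Pairwise (· > ·)) :
    ∀ (L P : List (String × Int)), (∀ p ∈ L, p.2 ∈ cs) →
    L.foldl pvIns (pvBucketed cs P) = pvBucketed cs (P ++ L) := by
  intro L
  induction L with
  | nil => intro P _; simp
  | cons x L ih =>
    intro P h
    simp only [List.foldl_cons]
    rw [pv_insert_bucketed cs hcs P x (h x (by simp))]
    have : P ++ x :: L = (P ++ [x]) ++ L := by simp
    rw [this]
    exact ih (P ++ [x]) (fun p hp => h p (by simp [hp]))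

theorem pv_sorted_eq_bucketed (cs : List Int) (hcs : cs.Pairwise (· > ·))
    (xs : List (String × Int)) (h : ∀ p ∈ xs, p.2 ∈ cs) :
    PySem.List.sorted xs (fun p => p.2) true = pvBucketed cs xs := by
  rw [PySem.List.sorted_rev_eq_foldl_insertBy]
  have h0 : pvBucketed cs [] = [] := by simp [pvBucketed]
  have := pv_foldl_bucketed cs hcs xs [] h
  rw [h0] at this
  simpa [pvIns] using this

theorem pv_insert_bound (d : PySem.Dict String Int) (n : Int) (hn : 0 ≤ n) (key : String)
    (h : ∀ p ∈ d.items, 1 ≤ p.2 ∧ p.2 ≤ n) :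
    ∀ p ∈ (d.insert key (d.getD key 0 + 1)).items, 1 ≤ p.2 ∧ p.2 ≤ n + 1 := by
  intro p hp
  by_cases hc : d.contains key = true
  · -- some value v0 with (·, v0) ∈ items is replaced by v0 + 1
    obtain ⟨q0, hq0mem, hq0⟩ := List.any_eq_true.mp hc
    have hfind : ∃ q, d.items.find? (fun p => p.1 == key) = some q := by
      rcases hfs : d.items.find? (fun p => p.1 == key) with _ | q
      · exact absurd (List.find?_eq_none.mp hfs q0 hq0mem hq0) (by simp)
      · exact ⟨q, hfs⟩
    obtain ⟨q, hq⟩ := hfind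
    have hqmem := List.mem_of_find?_eq_some hq
    have hqb := h q hqmem
    have hget : d.getD key 0 = q.2 := by
      simp [PySem.Dict.getD, PySem.Dict.get?, hq]
    simp only [PySem.Dict.insert, hc, if_true] at hp
    rcases List.mem_map.mp hp with ⟨r, hrmem, hr⟩
    by_cases hrk : (r.1 == key) = true
    · simp only [hrk, if_true] at hr
      have : p.2 = q.2 + 1 := by rw [← hr]; simp [hget]
      omega
    · simp only [hrk, if_false, Bool.false_eq_true] at hr
      have := h r hrmem
      rw [← hr]
      omega
  · -- new key appended with count 1
    have hfind : d.items.find? (fun p => p.1 == key) = none := by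
      rw [List.find?_eq_none]
      intro q hqmem hq
      exact hc (List.any_eq_true.mpr ⟨q, hqmem, hq⟩)
    have hget : d.getD key 0 = 0 := by
      simp [PySem.Dict.getD, PySem.Dict.get?, hfind]
    simp only [PySem.Dict.insert, hc, if_false, Bool.false_eq_true] at hp
    rcases List.mem_append.mp hp with hmem | hmem
    · have := h p hmem; omega
    · simp at hmem
      rw [hmem, hget]; norm_num; omega

theorem pv_inner_bound (cl : List (String × Int)) :
    ∀ (d : PySem.Dict String Int) (n : Int), 0 ≤ n →
    (∀ p ∈ d.items, 1 ≤ p.2 ∧ p.2 ≤ n) →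
    ∀ p ∈ (cl.foldl (fun d p => d.insert p.1 (d.getD p.1 0 + 1)) d).items,
      1 ≤ p.2 ∧ p.2 ≤ n + cl.length := by
  induction cl with
  | nil => intro d n _ h p hp; have := h p hp; simpa using this
  | cons x t ih =>
    intro d n hn h p hp
    simp only [List.foldl_cons] at hp
    have := ih (d.insert x.1 (d.getD x.1 0 + 1)) (n + 1) (by omega)
      (pv_insert_bound d n hn x.1 h) p hp
    obtain ⟨h1, h2⟩ := this
    refine ⟨h1, ?_⟩
    simp only [List.length_cons]
    push_cast
    omega

theorem pv_outer_bound (cls : List (List (String × Int))) :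
    ∀ (d : PySem.Dict String Int) (n : Int), 0 ≤ n →
    (∀ p ∈ d.items, 1 ≤ p.2 ∧ p.2 ≤ n) →
    ∀ p ∈ (cls.foldl (fun d cl => cl.foldl (fun d p => d.insert p.1 (d.getD p.1 0 + 1)) d) d).items,
      1 ≤ p.2 ∧ p.2 ≤ n + (cls.map (fun cl => (cl.length : Int))).sum := by
  induction cls with
  | nil => intro d n _ h p hp; have := h p hp; simpa using this
  | cons cl cls ih =>
    intro d n hn h p hp
    simp only [List.foldl_cons] at hp
    have := ih (cl.foldl (fun d p => d.insert p.1 (d.getD p.1 0 + 1)) d) (n + cl.length)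
      (by positivity) (pv_inner_bound cl d n hn h) p hp
    obtain ⟨h1, h2⟩ := this
    refine ⟨h1, ?_⟩
    simp only [List.map_cons, List.sum_cons]
    omega

theorem pv_foldl_sum (cls : List (List (String × Int))) :
    ∀ (s : Int), cls.foldl (fun s cl => s + (cl.length : Int)) s
      = s + (cls.map (fun cl => (cl.length : Int))).sum := by
  induction cls with
  | nil => intro s; simp
  | cons cl cls ih => intro s; simp only [List.foldl_cons, List.map_cons, List.sum_cons, ih]; ring

theorem pv_bucket_inv (L : List (String × Int)) :
    ∀ (bs : List (List (String × Int))),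
    (∀ p ∈ L, 1 ≤ p.2 ∧ p.2 < (bs.length : Int)) →
    ∀ c : Nat, c < bs.length →
      (L.foldl (fun bs p => bs.set p.2.toNat (bs.getD p.2.toNat [] ++ [p])) bs).getD c []
        = bs.getD c [] ++ L.filter (fun p => p.2 == (c : Int)) := by
  induction L with
  | nil => intro bs _ c _; simp
  | cons x L ih =>
    intro bs h c hc
    have hx := h x (by simp)
    have hxlt : x.2.toNat < bs.length := by omega
    simp only [List.foldl_cons]
    rw [ih (bs.set x.2.toNat (bs.getD x.2.toNat [] ++ [x]))
      (by intro p hp; have := h p (by simp [hp]); simpa using this)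
      c (by simpa using hc)]
    by_cases hxc : x.2.toNat = c
    · have hbeq : (x.2 == (c : Int)) = true := by simp; omega
      have hset : (bs.set x.2.toNat (bs.getD x.2.toNat [] ++ [x])).getD c []
          = bs.getD c [] ++ [x] := by
        simp [List.getD_eq_getElem?_getD, hxc, hxc ▸ hxlt]
      rw [hset, List.filter_cons, hbeq]
      simp
    · have hbeq : (x.2 == (c : Int)) = false := by simp; omega
      have hset : (bs.set x.2.toNat (bs.getD x.2.toNat [] ++ [x])).getD c []
          = bs.getD c [] := by
        simp [List.getD_eq_getElem?_getD, hxc]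
      rw [hset, List.filter_cons, hbeq]
      simp

theorem pv_pyRange_down (t : Int) :
    PySem.List.pyRange t 0 (-1) = (List.range t.toNat).map (fun k : Nat => t - (k : Int)) := by
  unfold PySem.List.pyRange
  norm_num
  by_cases h : 0 < t
  · rw [if_pos h]
    apply List.map_congr_left
    intro k _
    ring
  · rw [if_neg h]
    have : t.toNat = 0 := by omega
    simp [this]

theorem pv_mem_pyRange_down (t c : Int) :
    c ∈ PySem.List.pyRange t 0 (-1) ↔ 1 ≤ c ∧ c ≤ t := by
  rw [pv_pyRange_down]
  simp only [List.mem_map, List.mem_range]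
  constructor
  · rintro ⟨k, hk, rfl⟩; omega
  · rintro ⟨h1, h2⟩; exact ⟨(t - c).toNat, by omega, by omega⟩

theorem pv_pairwise_pyRange_down (t : Int) :
    (PySem.List.pyRange t 0 (-1)).Pairwise (· > ·) := by
  rw [pv_pyRange_down]
  exact List.pairwise_map.mpr (List.pairwise_lt_range.imp (by intro a b hab; simp; omega))

-- ===== VERDICT (by name: the statement is the Claim_ definition above) =====
theorem voting_spec : Claim_equal_voting := by
  intro cls k _
  unfold Spec_voting voting voting_alt
  simp only [PySem.Dict.modify]
  apply congrArg (fun l => PySem.List.slice l none (some k))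
  set d : PySem.Dict String Int := cls.foldl (fun d cl => cl.foldl (fun d p => d.insert p.1 (d.getD p.1 0 + 1)) d)
    PySem.Dict.empty with hd
  set total := cls.foldl (fun s cl => s + (cl.length : Int)) 0 with htotal
  have hsum : total = (cls.map (fun cl => (cl.length : Int))).sum := by
    rw [htotal, pv_foldl_sum]; ring
  have htot0 : 0 ≤ total := by
    rw [hsum]
    exact List.sum_nonneg (by intro x hx; rcases List.mem_map.mp hx with ⟨cl, _, rfl⟩; positivity)
  have hbound : ∀ p ∈ d.items, 1 ≤ p.2 ∧ p.2 ≤ total := by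
    intro p hp
    have := pv_outer_bound cls PySem.Dict.empty 0 le_rfl (by simp [PySem.Dict.empty]) p hp
    rw [hsum]; simpa using this
  set cs := PySem.List.pyRange total 0 (-1) with hcs
  -- A's stable descending sort is the bucket decomposition
  rw [pv_sorted_eq_bucketed cs (pv_pairwise_pyRange_down total) d.items
    (fun p hp => (pv_mem_pyRange_down total p.2).mpr (hbound p hp))]
  -- B's bucket loop produces exactly the buckets
  rw [PySem.List.foldl_append_eq_flatMap, List.nil_append]
  apply Eq.symm
  apply List.flatMap_congr
  intro c hcmem
  have hcb := (pv_mem_pyRange_down total c).mp hcmem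
  have hlen : (List.replicate (total.toNat + 1) ([] : List (String × Int))).length
      = total.toNat + 1 := List.length_replicate
  have hclt : c.toNat < total.toNat + 1 := by omega
  rw [pv_bucket_inv d.items (List.replicate (total.toNat + 1) [])
    (by intro p hp; have := hbound p hp; rw [hlen]; refine ⟨this.1, by push_cast; omega⟩)
    c.toNat (by rw [hlen]; exact hclt)]
  have hrep : (List.replicate (total.toNat + 1) ([] : List (String × Int))).getD c.toNat [] = [] := by
    simp [List.getD_eq_getElem?_getD, hclt]
  rw [hrep, List.nil_append]
  have : ((c.toNat : Int)) = c := by omega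
  rw [this]
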